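-- pv_equiv track=rewrite | github.com/suminb/coding-exercise | leetcode/regular-expression-matching.py | tokenize_pattern
-- ===== SOURCE A (Python) =====
-- def tokenize_pattern(pattern):
--     i, n = 0, len(pattern)
--     tokens = []
--     while i < n:
--         if i + 1 < n and pattern[i + 1] == '*':
--             tokens.append(pattern[i:i + 2])
--             i += 2
--         else:
--             tokens.append(pattern[i])
--             i += 1
--     tokens.append('$')
--     return tokens
-- ===== SOURCE B (Python) =====
-- def tokenize_pattern(pattern):
--     tokens = []
--     for c in pattern:
--         if c == '*' and tokens and len(tokens[-1]) == 1:
--             tokens[-1] += '*'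
--         else:
--             tokens.append(c)
--     tokens.append('$')
--     return tokens
-- ===== Notes on version B (the rewrite author's own statement) =====
-- stated objective: simpler
-- what changed: Replaces A's index-based while loop with one-position lookahead and string slicing by a direct per-character loop that merges a star onto the previous token when that token is a single character.
import Mathlib
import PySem

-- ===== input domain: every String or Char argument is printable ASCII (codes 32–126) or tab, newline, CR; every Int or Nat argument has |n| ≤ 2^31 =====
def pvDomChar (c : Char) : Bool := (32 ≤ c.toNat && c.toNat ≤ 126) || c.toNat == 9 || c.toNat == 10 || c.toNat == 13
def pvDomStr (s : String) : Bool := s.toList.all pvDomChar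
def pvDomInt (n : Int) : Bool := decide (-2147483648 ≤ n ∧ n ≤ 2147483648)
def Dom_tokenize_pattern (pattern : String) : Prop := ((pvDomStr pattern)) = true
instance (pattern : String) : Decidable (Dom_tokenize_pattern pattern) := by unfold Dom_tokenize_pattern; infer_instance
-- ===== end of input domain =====

-- B replaces A's index-with-lookahead loop by a direct per-character fold that merges a '*'
-- onto the previous single-character token (objective: simpler).
-- Both ports keep tokens as char lists and apply String.ofList once at return
-- (PySem string facts live on List Char).

-- ===== PORT A =====
-- A's while loop with i advancing by 2 (when pattern[i+1]=='*') or 1, as structural recursion.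
def tokA : List Char → List (List Char)
  | [] => []
  | [c] => [[c]]
  | c :: d :: rest => if d = '*' then [c, d] :: tokA rest else [c] :: tokA (d :: rest)

def tokenize_pattern (pattern : String) : List String :=
  (tokA pattern.toList ++ [['$']]).map String.ofList

-- ===== PORT B =====
-- one step of B's `for c in pattern` loop
def stepB (tokens : List (List Char)) (c : Char) : List (List Char) :=
  if c == '*' && (match tokens.getLast? with | some t => t.length == 1 | none => false) then
    tokens.dropLast ++ [tokens.getLast?.getD [] ++ ['*']]   -- tokens[-1] += '*'
  else
    tokens ++ [[c]]                                          -- tokens.append(c)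

def tokenize_pattern_alt (pattern : String) : List String :=
  (pattern.toList.foldl stepB [] ++ [['$']]).map String.ofList

-- ===== PRECONDITION & SPEC =====
def Spec_tokenize_pattern (pattern : String) (out : List String) : Prop := out = tokenize_pattern_alt pattern
instance (pattern : String) (out : List String) : Decidable (Spec_tokenize_pattern pattern out) := by unfold Spec_tokenize_pattern; infer_instance

-- ===== CLAIM (what is proved, stated in full; the proofs are below) =====
def Claim_equal_tokenize_pattern : Prop := ∀ (pattern : String), Dom_tokenize_pattern pattern → Spec_tokenize_pattern pattern (tokenize_pattern pattern)

-- ===== LEMMAS AND PROOFS =====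

-- a step whose merge guard fails is a plain append
lemma stepB_no_merge (tokens : List (List Char)) (c : Char)
    (h : c = '*' → (match tokens.getLast? with | some t => t.length == 1 | none => false) = false) :
    stepB tokens c = tokens ++ [[c]] := by
  unfold stepB
  by_cases hc : c = '*'
  · rw [h hc]; simp
  · simp [hc]

-- a step on '*' after a fresh single-char token merges
lemma stepB_merge (tokens : List (List Char)) (c : Char) :
    stepB (tokens ++ [[c]]) '*' = tokens ++ [[c, '*']] := by
  unfold stepB
  simp

-- loop invariant: if the next char is not '*' or the last accumulated token is not a
-- single character, B's fold from `acc` appends exactly A's token list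
lemma foldl_stepB_eq_tokA (cs : List Char) (acc : List (List Char))
    (h : cs.head? = some '*' →
      (match acc.getLast? with | some t => t.length == 1 | none => false) = false) :
    cs.foldl stepB acc = acc ++ tokA cs := by
  induction cs using tokA.induct generalizing acc with
  | case1 => simp [tokA]
  | case2 c =>
    have hstep : stepB acc c = acc ++ [[c]] := by
      apply stepB_no_merge
      intro hc; exact h (by simp [hc])
    simp [tokA, List.foldl, hstep]
  | case3 c rest ih =>
    have hstep : stepB acc c = acc ++ [[c]] := by
      apply stepB_no_merge
      intro hc; exact h (by simp [hc])
    have hrest : (('*' :: rest).foldl stepB (acc ++ [[c]])) = acc ++ ([c, '*'] :: tokA rest) := by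
      simp only [List.foldl, stepB_merge]
      rw [ih (acc ++ [[c, '*']]) (by intro _; simp)]
      simp
    simpa [tokA, List.foldl, hstep] using hrest
  | case4 c d rest hd ih =>
    have hstep : stepB acc c = acc ++ [[c]] := by
      apply stepB_no_merge
      intro hc; exact h (by simp [hc])
    rw [List.foldl_cons, hstep, ih (acc ++ [[c]]) (by intro hhd; simp at hhd; exact absurd hhd hd)]
    simp [tokA, if_neg hd]

-- ===== VERDICT (by name: the statement is the Claim_ definition above) =====
theorem tokenize_pattern_spec : Claim_equal_tokenize_pattern := by
  intro pattern _
  unfold Spec_tokenize_pattern tokenize_pattern tokenize_pattern_alt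
  rw [foldl_stepB_eq_tokA pattern.toList [] (by intro _; simp)]
  simp
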